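-- pv_equiv track=rewrite | github.com/Skitionek/lifelike | appserver/neo4japp/storage/adapters/azure_adls.py | _mode_to_posix_str
-- ===== SOURCE A (Python) =====
-- def _mode_to_posix_str(mode: int) -> str:
--     """Convert an integer mode (e.g. ``0o755``) to a ``rwxrwxrwx`` string."""
--     chars = []
--     for shift, char in [
--         (8, "r"), (7, "w"), (6, "x"),
--         (5, "r"), (4, "w"), (3, "x"),
--         (2, "r"), (1, "w"), (0, "x"),
--     ]:
--         chars.append(char if mode & (1 << shift) else "-")
--     return "".join(chars)
-- ===== SOURCE B (Python) =====
-- _TRIPLES = ("---", "--x", "-w-", "-wx", "r--", "r-x", "rw-", "rwx")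
--
--
-- def _mode_to_posix_str(mode: int) -> str:
--     """Convert an integer mode (e.g. ``0o755``) to a ``rwxrwxrwx`` string."""
--     return "".join(_TRIPLES[(mode >> s) & 7] for s in (6, 3, 0))
-- ===== Notes on version B (the rewrite author's own statement) =====
-- stated objective: idiomatic
-- what changed: Replaces A's nine per-bit mask tests appending one character each with a precomputed lookup table of the eight permission triples indexed by each octal digit of the mode (no bit testing at all).
import Mathlib
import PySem

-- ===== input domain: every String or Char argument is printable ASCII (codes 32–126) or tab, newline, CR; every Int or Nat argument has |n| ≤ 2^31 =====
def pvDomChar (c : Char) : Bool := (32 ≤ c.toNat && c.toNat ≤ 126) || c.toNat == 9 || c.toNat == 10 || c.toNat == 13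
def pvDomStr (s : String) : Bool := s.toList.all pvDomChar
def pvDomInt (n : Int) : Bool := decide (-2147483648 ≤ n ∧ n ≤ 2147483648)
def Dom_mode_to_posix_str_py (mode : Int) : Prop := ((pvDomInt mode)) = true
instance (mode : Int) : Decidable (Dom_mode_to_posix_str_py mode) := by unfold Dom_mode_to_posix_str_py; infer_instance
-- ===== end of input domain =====

-- B replaces A's nine per-bit mask tests with a precomputed lookup table of the
-- eight permission triples indexed by each octal digit of the mode (no bit testing).

-- ===== PORT A =====
def mode_to_posix_str_py (mode : Int) : String :=
  let pairs : List (Nat × String) :=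
    [(8, "r"), (7, "w"), (6, "x"),
     (5, "r"), (4, "w"), (3, "x"),
     (2, "r"), (1, "w"), (0, "x")]
  let chars : List String :=
    pairs.foldl (fun acc p => acc ++ [if PySem.Int.band mode (1 <<< p.1) ≠ 0 then p.2 else "-"]) []
  PySem.Str.join "" chars

-- ===== PORT B =====
def pvTriples : List String := ["---", "--x", "-w-", "-wx", "r--", "r-x", "rw-", "rwx"]

def mode_to_posix_str_py_alt (mode : Int) : String :=
  PySem.Str.join ""
    (List.map (fun s : Nat => pvTriples.getD (PySem.Int.band (mode >>> s) 7).toNat "")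
      [6, 3, 0])

-- ===== PRECONDITION & SPEC =====
def Spec_mode_to_posix_str_py (mode : Int) (out : String) : Prop := out = mode_to_posix_str_py_alt mode
instance (mode : Int) (out : String) : Decidable (Spec_mode_to_posix_str_py mode out) := by unfold Spec_mode_to_posix_str_py; infer_instance

-- ===== CLAIM (what is proved, stated in full; the proofs are below) =====
def Claim_equal_mode_to_posix_str_py : Prop := ∀ (mode : Int), Dom_mode_to_posix_str_py mode → Spec_mode_to_posix_str_py mode (mode_to_posix_str_py mode)

-- ===== LEMMAS AND PROOFS =====

-- PySem.Int.band on the two sign shapes, pushed down to Nat `&&&`.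
lemma pvBandNN (m b : Nat) : PySem.Int.band (Int.ofNat m) (Int.ofNat b) = Int.ofNat (m &&& b) := by
  simp [PySem.Int.band]

lemma pvBandSN (m b : Nat) : PySem.Int.band (Int.negSucc m) (Int.ofNat b) = Int.ofNat (b - (b &&& m)) := by
  simp [PySem.Int.band]

lemma pvAndPowZero (x t : Nat) : (x &&& 2 ^ t = 0) ↔ x.testBit t = false := by
  rw [Nat.and_two_pow]
  cases h : x.testBit t <;> simp [h]

lemma pvAnd7TestBit (m t : Nat) (ht : t < 3) : (7 &&& m).testBit t = m.testBit t := by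
  have h7 : Nat.testBit 7 t = true := by interval_cases t <;> decide
  rw [Nat.testBit_and, h7, Bool.true_and]

lemma pvComplTestBit (x t : Nat) (hx : x ≤ 7) (ht : t < 3) : (7 - x).testBit t = ! x.testBit t := by
  interval_cases x <;> interval_cases t <;> decide

lemma pvComplZero (n s : Nat) : (2 ^ s - (2 ^ s &&& n) = 0) ↔ n.testBit s = true := by
  rw [Nat.and_comm, Nat.and_two_pow]
  cases h : n.testBit s <;> simp [h]

-- A's group-digit extracted by B: band (a >>> s) 7 is some octal digit d < 8.
lemma pvBandDigit (a : Int) (s : Nat) :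
    ∃ d : Nat, d < 8 ∧ PySem.Int.band (a >>> s) (7 : Int) = (d : Int) := by
  cases a with
  | ofNat n =>
    refine ⟨(n >>> s) &&& 7, ?_, ?_⟩
    · have := Nat.and_le_right (n := n >>> s) (m := 7); omega
    · show PySem.Int.band (Int.ofNat (n >>> s)) (Int.ofNat 7) = Int.ofNat ((n >>> s) &&& 7)
      exact pvBandNN _ _
  | negSucc n =>
    refine ⟨7 - (7 &&& (n >>> s)), ?_, ?_⟩
    · omega
    · show PySem.Int.band (Int.negSucc (n >>> s)) (Int.ofNat 7) = Int.ofNat (7 - (7 &&& (n >>> s)))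
      exact pvBandSN _ _

-- The core fact: A's flat test of bit (3*i+t) agrees with the t-th bit of B's group digit.
lemma pvBandTest (a : Int) (i t : Nat) (ht : t < 3) :
    (PySem.Int.band a ((1 : Int) <<< (3 * i + t)) ≠ 0) ↔
      (PySem.Int.band (PySem.Int.band (a >>> (3 * i)) (Int.ofNat 7)) (Int.ofNat (2 ^ t)) ≠ 0) := by
  have hsh : ((1 : Int) <<< (3 * i + t)) = Int.ofNat (2 ^ (3 * i + t)) := by
    show Int.ofNat (1 <<< (3 * i + t)) = _
    rw [Nat.shiftLeft_eq, one_mul]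
  rw [hsh]
  cases a with
  | ofNat n =>
    rw [show (Int.ofNat n) >>> (3 * i) = Int.ofNat (n >>> (3 * i)) from rfl,
        pvBandNN, pvBandNN, pvBandNN]
    simp only [Int.ofNat_eq_natCast, ne_eq, Nat.cast_eq_zero]
    apply not_congr
    rw [pvAndPowZero, pvAndPowZero, Nat.and_comm (n >>> (3 * i)) 7,
        pvAnd7TestBit _ t ht, Nat.testBit_shiftRight]
  | negSucc n =>
    rw [show (Int.negSucc n) >>> (3 * i) = Int.negSucc (n >>> (3 * i)) from rfl,
        pvBandSN, pvBandSN, pvBandNN]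
    simp only [Int.ofNat_eq_natCast, ne_eq, Nat.cast_eq_zero]
    apply not_congr
    rw [pvComplZero, pvAndPowZero,
        pvComplTestBit _ t (Nat.and_le_left) ht,
        pvAnd7TestBit _ t ht, Nat.testBit_shiftRight]
    cases h : n.testBit (3 * i + t) <;> simp [h]

-- For a literal digit d < 8, A's three characters for that group join to B's table entry.
lemma pvGroupLem (d : Nat) (hd : d < 8) :
    PySem.Str.join ""
      [(if PySem.Int.band (d : Int) 4 ≠ 0 then "r" else "-"),
       (if PySem.Int.band (d : Int) 2 ≠ 0 then "w" else "-"),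
       (if PySem.Int.band (d : Int) 1 ≠ 0 then "x" else "-")]
      = pvTriples.getD d "" := by
  interval_cases d <;> rfl

-- A's flat bit tests rewritten to tests on B's group digits, at the literal shifts.
lemma pvBit8 (a : Int) : (PySem.Int.band a (1 <<< 8) ≠ 0) ↔ (PySem.Int.band (PySem.Int.band (a >>> (6 : Nat)) 7) 4 ≠ 0) := by
  have h := pvBandTest a 2 2 (by omega)
  rw [show ((1 : Int) <<< ((3 * 2 + 2 : Nat))) = ↑((1 : Nat) <<< 8) from rfl,
      show (Int.ofNat (2 ^ 2)) = (4 : Int) from rfl,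
      show (Int.ofNat 7) = (7 : Int) from rfl,
      show (3 * 2 : Nat) = 6 from rfl] at h
  exact h

lemma pvBit7 (a : Int) : (PySem.Int.band a (1 <<< 7) ≠ 0) ↔ (PySem.Int.band (PySem.Int.band (a >>> (6 : Nat)) 7) 2 ≠ 0) := by
  have h := pvBandTest a 2 1 (by omega)
  rw [show ((1 : Int) <<< ((3 * 2 + 1 : Nat))) = ↑((1 : Nat) <<< 7) from rfl,
      show (Int.ofNat (2 ^ 1)) = (2 : Int) from rfl,
      show (Int.ofNat 7) = (7 : Int) from rfl,
      show (3 * 2 : Nat) = 6 from rfl] at h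
  exact h

lemma pvBit6 (a : Int) : (PySem.Int.band a (1 <<< 6) ≠ 0) ↔ (PySem.Int.band (PySem.Int.band (a >>> (6 : Nat)) 7) 1 ≠ 0) := by
  have h := pvBandTest a 2 0 (by omega)
  rw [show ((1 : Int) <<< ((3 * 2 + 0 : Nat))) = ↑((1 : Nat) <<< 6) from rfl,
      show (Int.ofNat (2 ^ 0)) = (1 : Int) from rfl,
      show (Int.ofNat 7) = (7 : Int) from rfl,
      show (3 * 2 : Nat) = 6 from rfl] at h
  exact h

lemma pvBit5 (a : Int) : (PySem.Int.band a (1 <<< 5) ≠ 0) ↔ (PySem.Int.band (PySem.Int.band (a >>> (3 : Nat)) 7) 4 ≠ 0) := by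
  have h := pvBandTest a 1 2 (by omega)
  rw [show ((1 : Int) <<< ((3 * 1 + 2 : Nat))) = ↑((1 : Nat) <<< 5) from rfl,
      show (Int.ofNat (2 ^ 2)) = (4 : Int) from rfl,
      show (Int.ofNat 7) = (7 : Int) from rfl,
      show (3 * 1 : Nat) = 3 from rfl] at h
  exact h

lemma pvBit4 (a : Int) : (PySem.Int.band a (1 <<< 4) ≠ 0) ↔ (PySem.Int.band (PySem.Int.band (a >>> (3 : Nat)) 7) 2 ≠ 0) := by
  have h := pvBandTest a 1 1 (by omega)
  rw [show ((1 : Int) <<< ((3 * 1 + 1 : Nat))) = ↑((1 : Nat) <<< 4) from rfl,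
      show (Int.ofNat (2 ^ 1)) = (2 : Int) from rfl,
      show (Int.ofNat 7) = (7 : Int) from rfl,
      show (3 * 1 : Nat) = 3 from rfl] at h
  exact h

lemma pvBit3 (a : Int) : (PySem.Int.band a (1 <<< 3) ≠ 0) ↔ (PySem.Int.band (PySem.Int.band (a >>> (3 : Nat)) 7) 1 ≠ 0) := by
  have h := pvBandTest a 1 0 (by omega)
  rw [show ((1 : Int) <<< ((3 * 1 + 0 : Nat))) = ↑((1 : Nat) <<< 3) from rfl,
      show (Int.ofNat (2 ^ 0)) = (1 : Int) from rfl,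
      show (Int.ofNat 7) = (7 : Int) from rfl,
      show (3 * 1 : Nat) = 3 from rfl] at h
  exact h

lemma pvBit2 (a : Int) : (PySem.Int.band a (1 <<< 2) ≠ 0) ↔ (PySem.Int.band (PySem.Int.band (a >>> (0 : Nat)) 7) 4 ≠ 0) := by
  have h := pvBandTest a 0 2 (by omega)
  rw [show ((1 : Int) <<< ((3 * 0 + 2 : Nat))) = ↑((1 : Nat) <<< 2) from rfl,
      show (Int.ofNat (2 ^ 2)) = (4 : Int) from rfl,
      show (Int.ofNat 7) = (7 : Int) from rfl,
      show (3 * 0 : Nat) = 0 from rfl] at h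
  exact h

lemma pvBit1 (a : Int) : (PySem.Int.band a (1 <<< 1) ≠ 0) ↔ (PySem.Int.band (PySem.Int.band (a >>> (0 : Nat)) 7) 2 ≠ 0) := by
  have h := pvBandTest a 0 1 (by omega)
  rw [show ((1 : Int) <<< ((3 * 0 + 1 : Nat))) = ↑((1 : Nat) <<< 1) from rfl,
      show (Int.ofNat (2 ^ 1)) = (2 : Int) from rfl,
      show (Int.ofNat 7) = (7 : Int) from rfl,
      show (3 * 0 : Nat) = 0 from rfl] at h
  exact h

lemma pvBit0 (a : Int) : (PySem.Int.band a (1 <<< 0) ≠ 0) ↔ (PySem.Int.band (PySem.Int.band (a >>> (0 : Nat)) 7) 1 ≠ 0) := by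
  have h := pvBandTest a 0 0 (by omega)
  rw [show ((1 : Int) <<< ((3 * 0 + 0 : Nat))) = ↑((1 : Nat) <<< 0) from rfl,
      show (Int.ofNat (2 ^ 0)) = (1 : Int) from rfl,
      show (Int.ofNat 7) = (7 : Int) from rfl,
      show (3 * 0 : Nat) = 0 from rfl] at h
  exact h

-- Splitting a nine-string join into three joined triples (empty separator).
lemma pvJoinSplit (a b c d e f g h i : String) :
    PySem.Str.join "" [a, b, c, d, e, f, g, h, i]
      = PySem.Str.join "" [PySem.Str.join "" [a, b, c],
                           PySem.Str.join "" [d, e, f],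
                           PySem.Str.join "" [g, h, i]] := by
  simp [PySem.Str.join, PySem.Chars.join, List.intercalate]

-- ===== VERDICT (by name: the statement is the Claim_ definition above) =====
theorem mode_to_posix_str_py_spec : Claim_equal_mode_to_posix_str_py := by
  intro mode _
  show mode_to_posix_str_py mode = mode_to_posix_str_py_alt mode
  obtain ⟨d2, hd2, he2⟩ := pvBandDigit mode 6
  obtain ⟨d1, hd1, he1⟩ := pvBandDigit mode 3
  obtain ⟨d0, hd0, he0⟩ := pvBandDigit mode 0
  simp only [mode_to_posix_str_py, mode_to_posix_str_py_alt, List.foldl, List.map,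
    List.nil_append, List.cons_append,
    pvBit8 mode, pvBit7 mode, pvBit6 mode, pvBit5 mode, pvBit4 mode, pvBit3 mode,
    pvBit2 mode, pvBit1 mode, pvBit0 mode, he2, he1, he0, Int.toNat_natCast]
  rw [pvJoinSplit, pvGroupLem d2 hd2, pvGroupLem d1 hd1, pvGroupLem d0 hd0]
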